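-- pv_equiv track=rewrite | github.com/rowinf/static-site-generator | src/split_nodes_delimiter.py | _dive
-- ===== SOURCE A (Python) =====
-- def _dive(text, delimiter, segments, start=0, inside=False):
--     index = text.find(delimiter, start)
--     if index == -1:
--         segments.append((text[start : len(text)], inside))
--         return segments
--     else:
--         segments.append((text[start:index], inside))
--         return _dive(text, delimiter, segments, index + 1, not inside)
-- ===== SOURCE B (Python) =====
-- def _dive(text, delimiter, segments, start=0, inside=False):
--     # Two-phase: first collect every delimiter occurrence position,
--     # then build all segments in one pass over those cut positions.
--     cuts = []
--     i = text.find(delimiter, start)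
--     while i != -1:
--         cuts.append(i)
--         i = text.find(delimiter, i + 1)
--     prev = start
--     for p in cuts:
--         segments.append((text[prev:p], inside))
--         prev = p + 1
--         inside = not inside
--     segments.append((text[prev:], inside))
--     return segments
-- ===== Notes on version B (the rewrite author's own statement) =====
-- stated objective: alternative
-- what changed: Replaces A's tail recursion that interleaves searching and appending with a two-phase algorithm: a first loop collects all delimiter occurrence positions via str.find, then one pass over those cut positions emits all segments.
import Mathlib
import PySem

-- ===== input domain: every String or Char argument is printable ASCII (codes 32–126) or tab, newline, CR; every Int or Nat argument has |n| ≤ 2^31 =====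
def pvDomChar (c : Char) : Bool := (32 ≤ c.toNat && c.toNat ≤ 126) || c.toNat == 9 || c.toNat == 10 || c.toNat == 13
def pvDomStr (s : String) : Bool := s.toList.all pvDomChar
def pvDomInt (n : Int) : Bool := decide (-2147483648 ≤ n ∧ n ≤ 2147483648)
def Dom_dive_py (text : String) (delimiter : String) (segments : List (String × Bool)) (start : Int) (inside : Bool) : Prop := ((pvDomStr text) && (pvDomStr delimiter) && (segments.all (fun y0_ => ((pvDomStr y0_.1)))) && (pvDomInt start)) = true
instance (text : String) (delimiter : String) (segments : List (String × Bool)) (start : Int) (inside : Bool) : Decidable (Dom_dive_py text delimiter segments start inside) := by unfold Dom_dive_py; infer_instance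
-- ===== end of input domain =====

-- B replaces A's tail recursion that interleaves searching and appending with a two-phase
-- algorithm (collect all delimiter occurrence positions via find, then one pass emits the
-- segments); alternative decomposition, no speed claim.
-- The Python A mutates `segments` in place; B performs the same mutation.

-- termination helper (shared by both ports): a successful find is ≥ start, ≥ 0 and ≤ len(text)
theorem pvFindFrom_bounds (s sub : List Char) (start : Int)
    (h : PySem.Chars.findFrom s sub start none ≠ -1) :
    start ≤ PySem.Chars.findFrom s sub start none ∧ 0 ≤ PySem.Chars.findFrom s sub start none ∧
      PySem.Chars.findFrom s sub start none ≤ s.length := by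
  have hle := PySem.Chars.find_le_length
    ((s.take (Int.toNat s.length)).drop (Int.toNat (if start < 0 then if start + s.length < 0 then 0 else start + s.length else start))) sub
  have hnn : PySem.Chars.find
      ((s.take (Int.toNat s.length)).drop (Int.toNat (if start < 0 then if start + s.length < 0 then 0 else start + s.length else start))) sub = -1 ∨
      0 ≤ PySem.Chars.find
      ((s.take (Int.toNat s.length)).drop (Int.toNat (if start < 0 then if start + s.length < 0 then 0 else start + s.length else start))) sub := by
    by_cases hi : sub <:+: ((s.take (Int.toNat s.length)).drop (Int.toNat (if start < 0 then if start + s.length < 0 then 0 else start + s.length else start)))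
    · exact Or.inr ((PySem.Chars.find_nonneg_iff _ _).mpr hi)
    · exact Or.inl ((PySem.Chars.find_eq_neg_one_iff _ _).mpr hi)
  simp only [PySem.Chars.findFrom] at h ⊢
  simp only [List.length_drop, List.length_take] at hle
  split_ifs at h ⊢ with h1 h2 h3 <;> simp_all <;> omega

-- ===== PORT A =====
def dive_py (text : String) (delimiter : String) (segments : List (String × Bool)) (start : Int) (inside : Bool) : List (String × Bool) :=
  let index := PySem.Str.findFrom text delimiter start none
  if index = -1 then
    segments ++ [(PySem.Str.slice text (some start) (some (PySem.Str.len text)), inside)]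
  else
    dive_py text delimiter (segments ++ [(PySem.Str.slice text (some start) (some index), inside)]) (index + 1) (!inside)
termination_by (PySem.Str.len text + 1 - start).toNat
decreasing_by
  have := pvFindFrom_bounds text.toList delimiter.toList start (by simpa [PySem.Str.findFrom_eq] using ‹_›)
  simp only [PySem.Str.findFrom_eq, PySem.Str.len] at *
  omega

-- ===== PORT B =====
-- phase 1 of Source B: the while-loop collecting every delimiter occurrence position
def pvCutsB (text : String) (delimiter : String) (start : Int) : List Int :=
  let i := PySem.Str.findFrom text delimiter start none
  if i = -1 then [] else i :: pvCutsB text delimiter (i + 1)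
termination_by (PySem.Str.len text + 1 - start).toNat
decreasing_by
  have := pvFindFrom_bounds text.toList delimiter.toList start (by simpa [PySem.Str.findFrom_eq] using ‹_›)
  simp only [PySem.Str.findFrom_eq, PySem.Str.len] at *
  omega

def dive_py_alt (text : String) (delimiter : String) (segments : List (String × Bool)) (start : Int) (inside : Bool) : List (String × Bool) :=
  let cuts := pvCutsB text delimiter start
  let st := cuts.foldl
    (fun (acc : List (String × Bool) × Int × Bool) p =>
      (acc.1 ++ [(PySem.Str.slice text (some acc.2.1) (some p), acc.2.2)], p + 1, !acc.2.2))
    (segments, start, inside)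
  st.1 ++ [(PySem.Str.slice text (some st.2.1) none, st.2.2)]

-- ===== PRECONDITION & SPEC =====
def Spec_dive_py (text : String) (delimiter : String) (segments : List (String × Bool)) (start : Int) (inside : Bool) (out : List (String × Bool)) : Prop := out = dive_py_alt text delimiter segments start inside
instance (text : String) (delimiter : String) (segments : List (String × Bool)) (start : Int) (inside : Bool) (out : List (String × Bool)) : Decidable (Spec_dive_py text delimiter segments start inside out) := by unfold Spec_dive_py; infer_instance

-- ===== CLAIM (what is proved, stated in full; the proofs are below) =====
def Claim_equal_dive_py : Prop := ∀ (text : String) (delimiter : String) (segments : List (String × Bool)) (start : Int) (inside : Bool), Dom_dive_py text delimiter segments start inside → Spec_dive_py text delimiter segments start inside (dive_py text delimiter segments start inside)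

-- ===== LEMMAS AND PROOFS =====
-- text[a:len(text)] and text[a:] are the same slice
theorem pvSliceLen (text : String) (a : Int) :
    PySem.Str.slice text (some a) (some (PySem.Str.len text)) = PySem.Str.slice text (some a) none := by
  rw [← String.toList_inj, PySem.Str.toList_slice, PySem.Str.toList_slice]
  simp only [PySem.Chars.slice_eq_listSlice]
  rw [PySem.List.slice_some_none]
  simp only [PySem.List.slice, PySem.List.clampIdx]
  split_ifs <;> simp_all <;> omega

theorem pvMain (text delimiter : String) (segments : List (String × Bool)) (start : Int) (inside : Bool) :
    dive_py text delimiter segments start inside = dive_py_alt text delimiter segments start inside := by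
  rw [dive_py, dive_py_alt, pvCutsB]
  by_cases h : PySem.Str.findFrom text delimiter start none = -1
  · simp only [h, if_pos, List.foldl_nil]
    rw [pvSliceLen]
  · rw [if_neg h, if_neg h, List.foldl_cons,
      pvMain text delimiter (segments ++ [(PySem.Str.slice text (some start) (some (PySem.Str.findFrom text delimiter start none)), inside)]) (PySem.Str.findFrom text delimiter start none + 1) (!inside),
      dive_py_alt]
termination_by (PySem.Str.len text + 1 - start).toNat
decreasing_by
  have := pvFindFrom_bounds text.toList delimiter.toList start (by simpa [PySem.Str.findFrom_eq] using h)
  simp only [PySem.Str.findFrom_eq, PySem.Str.len] at *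
  omega

-- ===== VERDICT (by name: the statement is the Claim_ definition above) =====
theorem dive_py_spec : Claim_equal_dive_py := by
  intro text delimiter segments start inside _
  unfold Spec_dive_py
  exact pvMain text delimiter segments start inside
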